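-- pv_equiv track=rewrite | github.com/carolinalimaal/Prog-I-Hidaka | Lista1_Prog1/14.py | buscar_linearmente_numero_inteiro_ordenado
-- ===== SOURCE A (Python) =====
-- def buscar_linearmente_numero_inteiro_ordenado(lista_inteiros, numero_buscado):
--     """
--     Ordena a lista de valores inteiros e busca linearmente um número inteiro específico nessa lista.
--     Se achar o valor, a função retorna True e o número de comparações feitas até encontrar o valor.
--     Caso, contrário, retorna False e o número de comparações feitas até encontrar o valor.
--     Argumentos:
--         lista_numeros_inteiros: Uma lista contendo valores inteiros
--         numero_buscado: Valor inteiro que se deseja encontrar na lista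
--     Saída:
--         True (para quando encontrar o valor) ou False (para quando não encontrar o valor)
--         contador: Número de comparações até finalizar a busca
--     """
--     contador = 0
--     for item in sorted(lista_inteiros):
--         if item == numero_buscado:
--             contador += 1
--             return True, contador
--         contador += 1
--     return False, contador
-- ===== SOURCE B (Python) =====
-- def buscar_linearmente_numero_inteiro_ordenado(lista_inteiros, numero_buscado):
--     achou = False
--     menores = 0
--     for x in lista_inteiros:
--         if x < numero_buscado:
--             menores += 1
--         elif x == numero_buscado:
--             achou = True
--     if achou:
--         return True, menores + 1
--     return False, len(lista_inteiros)
-- ===== Notes on version B (the rewrite author's own statement) =====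
-- stated objective: faster
-- what changed: Replaces sort-then-scan with a single unsorted pass counting elements strictly below the target and checking membership; the comparison count equals that count plus one when found, else the list length.
import Mathlib
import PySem

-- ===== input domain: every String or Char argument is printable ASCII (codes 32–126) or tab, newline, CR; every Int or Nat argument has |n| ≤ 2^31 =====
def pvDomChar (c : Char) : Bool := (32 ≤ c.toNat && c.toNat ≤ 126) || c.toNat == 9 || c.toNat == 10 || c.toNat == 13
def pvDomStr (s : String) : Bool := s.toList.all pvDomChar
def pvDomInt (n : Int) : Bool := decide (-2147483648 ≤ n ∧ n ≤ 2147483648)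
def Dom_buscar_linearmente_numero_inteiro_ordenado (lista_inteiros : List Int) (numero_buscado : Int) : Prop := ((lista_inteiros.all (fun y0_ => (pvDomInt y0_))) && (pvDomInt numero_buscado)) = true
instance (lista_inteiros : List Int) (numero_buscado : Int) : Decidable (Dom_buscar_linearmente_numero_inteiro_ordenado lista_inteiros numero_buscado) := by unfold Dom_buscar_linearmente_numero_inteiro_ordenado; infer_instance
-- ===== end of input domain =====

-- B replaces A's sort-then-scan with one unsorted pass (count of elements below the target + membership): asymptotically faster.


-- ===== PORT A =====
-- the 'for item in sorted(...)' loop with accumulator contador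
def pvLoopA (numero_buscado : Int) : List Int → Int → Bool × Int
  | [], contador => (false, contador)
  | item :: rest, contador =>
      if item == numero_buscado then (true, contador + 1)
      else pvLoopA numero_buscado rest (contador + 1)

def buscar_linearmente_numero_inteiro_ordenado (lista_inteiros : List Int) (numero_buscado : Int) : Bool × Int :=
  pvLoopA numero_buscado (PySem.List.sorted lista_inteiros (fun x => x) false) 0

-- ===== PORT B =====
def buscar_linearmente_numero_inteiro_ordenado_alt (lista_inteiros : List Int) (numero_buscado : Int) : Bool × Int :=
  let s := lista_inteiros.foldl
    (fun (st : Bool × Int) x =>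
      if x < numero_buscado then (st.1, st.2 + 1)
      else if x == numero_buscado then (true, st.2)
      else st)
    (false, 0)
  if s.1 then (true, s.2 + 1) else (false, (lista_inteiros.length : Int))

-- ===== PRECONDITION & SPEC =====
def Spec_buscar_linearmente_numero_inteiro_ordenado (lista_inteiros : List Int) (numero_buscado : Int) (out : Bool × Int) : Prop := out = buscar_linearmente_numero_inteiro_ordenado_alt lista_inteiros numero_buscado
instance (lista_inteiros : List Int) (numero_buscado : Int) (out : Bool × Int) : Decidable (Spec_buscar_linearmente_numero_inteiro_ordenado lista_inteiros numero_buscado out) := by unfold Spec_buscar_linearmente_numero_inteiro_ordenado; infer_instance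

-- ===== CLAIM (what is proved, stated in full; the proofs are below) =====
def Claim_equal_buscar_linearmente_numero_inteiro_ordenado : Prop := ∀ (lista_inteiros : List Int) (numero_buscado : Int), Dom_buscar_linearmente_numero_inteiro_ordenado lista_inteiros numero_buscado → Spec_buscar_linearmente_numero_inteiro_ordenado lista_inteiros numero_buscado (buscar_linearmente_numero_inteiro_ordenado lista_inteiros numero_buscado)

-- ===== LEMMAS AND PROOFS =====

-- A's scan on a ≤-sorted list: comparisons = (#elements < target) + 1 when found, length when not.
theorem pvLoopA_sorted (t : Int) (l : List Int) (hl : l.Pairwise (· ≤ ·)) (c : Int) :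
    pvLoopA t l c =
      if t ∈ l then (true, c + (l.countP (fun x => decide (x < t)) : Int) + 1)
      else (false, c + (l.length : Int)) := by
  induction l generalizing c with
  | nil => simp [pvLoopA]
  | cons a rest ih =>
    rcases List.pairwise_cons.mp hl with ⟨ha, hrest⟩
    by_cases hat : a = t
    · subst hat
      have hcount : rest.countP (fun x => decide (x < a)) = 0 := by
        apply List.countP_eq_zero.mpr
        intro x hx
        simp only [decide_eq_true_eq]
        exact not_lt.mpr (ha x hx)
      simp [pvLoopA, hcount]
    · have hstep : pvLoopA t (a :: rest) c = pvLoopA t rest (c + 1) := by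
        simp [pvLoopA, hat]
      rw [hstep, ih hrest (c + 1)]
      by_cases hmem : t ∈ rest
      · have halt : a < t := by
          rcases lt_or_eq_of_le (ha t hmem) with h | h
          · exact h
          · exact absurd h hat
        have : (a :: rest).countP (fun x => decide (x < t)) =
            rest.countP (fun x => decide (x < t)) + 1 := by
          simp [halt]
        simp only [List.mem_cons, hmem, or_true, if_pos, this]
        push_cast
        ring_nf
      · have : t ∉ a :: rest := by simp [hmem, Ne.symm hat]
        simp only [hmem, this, List.length_cons]
        push_cast
        ring_nf

-- B's fold from an arbitrary state
theorem pvFoldB (t : Int) (l : List Int) (b : Bool) (m : Int) :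
    l.foldl
      (fun (st : Bool × Int) x =>
        if x < t then (st.1, st.2 + 1)
        else if x == t then (true, st.2)
        else st)
      (b, m) = (b || decide (t ∈ l), m + (l.countP (fun x => decide (x < t)) : Int)) := by
  induction l generalizing b m with
  | nil => simp
  | cons a rest ih =>
    by_cases hlt : a < t
    · have hne : ¬ (a = t) := by omega
      simp only [List.foldl_cons, if_pos hlt]
      rw [ih]
      simp [hlt, Ne.symm hne]
      ring
    · by_cases heq : a = t
      · subst heq
        simp only [List.foldl_cons, if_neg hlt, beq_self_eq_true, if_pos]
        rw [ih]
        simp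
      · have : (a == t) = false := by simp [heq]
        simp only [List.foldl_cons, if_neg hlt, this, Bool.false_eq_true]
        rw [ih]
        simp [hlt, Ne.symm heq]

theorem pvMainEq (l : List Int) (t : Int) :
    buscar_linearmente_numero_inteiro_ordenado l t =
      buscar_linearmente_numero_inteiro_ordenado_alt l t := by
  unfold buscar_linearmente_numero_inteiro_ordenado buscar_linearmente_numero_inteiro_ordenado_alt
  have hperm : (PySem.List.sorted l (fun x => x) false).Perm l := PySem.List.sorted_perm l _ _
  rw [pvLoopA_sorted t _ (PySem.List.sorted_pairwise l (fun x => x)) 0,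
      pvFoldB t l false 0]
  have hmem : (t ∈ PySem.List.sorted l (fun x => x) false) ↔ t ∈ l := hperm.mem_iff
  have hcount : (PySem.List.sorted l (fun x => x) false).countP (fun x => decide (x < t)) =
      l.countP (fun x => decide (x < t)) := hperm.countP_eq _
  have hlen : (PySem.List.sorted l (fun x => x) false).length = l.length := hperm.length_eq
  by_cases hm : t ∈ l
  · simp [hmem, hm, hcount]
  · simp [hmem, hm, hlen]

-- ===== VERDICT (by name: the statement is the Claim_ definition above) =====
theorem buscar_linearmente_numero_inteiro_ordenado_spec : Claim_equal_buscar_linearmente_numero_inteiro_ordenado := by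
  intro l t _
  exact pvMainEq l t
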